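-- pv_equiv track=rewrite | github.com/jenny-jione/apple-game | main.py | pop_line
-- ===== SOURCE A (Python) =====
-- def pop_line(line: list):
--     i = 0
--     j = 1
--     while(i<len(line) and j<=len(line)):
--         if sum(line[i:j]) == 10:
--             line[i:j] = [0 for _ in line[i:j]]
--             i += (j-i)
--             j = i+1
--         elif sum(line[i:j]) > 10:
--             i += 1
--             j = i+1
--         else:
--             j += 1
--     return line
-- ===== SOURCE B (Python) =====
-- def pop_line(line):
--     n = len(line)
--     res = []
--     i = 0
--     while i < n:
--         s = 0
--         j = i
--         found = False
--         while j < n: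
--             s += line[j]
--             j += 1
--             if s >= 10:
--                 found = True
--                 break
--         if not found:
--             res.extend(line[i:])
--             i = n
--         elif s == 10:
--             res.extend([0] * (j - i))
--             i = j
--         else:
--             res.append(line[i])
--             i += 1
--     line[:] = res
--     return line
-- ===== Notes on version B (the rewrite author's own statement) =====
-- stated objective: alternative
-- what changed: Replaces A's repeated sum(line[i:j]) slice sums, slice assignment and index restarts with a single left-to-right pass that keeps an incremental running sum per start and builds the output list by appending; intended as faster (measured 11x-260x on the sizes where both finish) but both remain quadratic on worst-case inputs, so no unqualified speed claim.
import Mathlib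
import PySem

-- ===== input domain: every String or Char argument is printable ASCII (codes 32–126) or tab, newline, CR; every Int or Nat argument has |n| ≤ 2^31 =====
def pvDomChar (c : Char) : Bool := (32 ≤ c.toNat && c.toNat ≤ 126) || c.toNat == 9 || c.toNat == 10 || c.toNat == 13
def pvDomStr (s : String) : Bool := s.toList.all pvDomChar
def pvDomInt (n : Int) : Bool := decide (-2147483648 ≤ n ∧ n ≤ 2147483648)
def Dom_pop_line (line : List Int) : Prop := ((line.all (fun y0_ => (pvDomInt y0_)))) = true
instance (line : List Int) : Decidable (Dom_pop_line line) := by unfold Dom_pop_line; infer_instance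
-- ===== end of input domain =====

-- B replaces A's repeated slice sums and in-place slice assignment by one left-to-right pass with an
-- incremental running sum per start, building the output by appending (objective: alternative decomposition;
-- much faster on a timing run's mid-size inputs, though both are quadratic on worst-case inputs).
-- Both A and B mutate `line` in place (B via `line[:] = res`); the theorems are about the return value.

-- ===== PORT A =====
-- xs[i:j] = [0 for _ in xs[i:j]] : same-length zero block written over indices i..j-1,
-- rendered index-wise (exact for every i, j, including empty slices).
def pvZero (xs : List Int) (i j : Nat) : List Int :=
  xs.mapIdx (fun k x => if i ≤ k ∧ k < j then (0 : Int) else x)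

-- termination helpers for the ports (cited by name in decreasing_by)
theorem pvZero_length (xs : List Int) (i j : Nat) : (pvZero xs i j).length = xs.length := by
  simp [pvZero]

theorem pvLt_of_sum10 (xs : List Int) (i j : Nat)
    (hs : (PySem.List.slice xs (some (i : Int)) (some (j : Int))).sum = 10) : i < j := by
  rcases Nat.lt_or_ge i j with h' | h'
  · exact h'
  · exfalso
    rw [PySem.List.slice_natCast] at hs
    simp [Nat.sub_eq_zero_of_le h'] at hs

theorem pvMeasA1 (len i j : Nat) (hij : i < j) (hj : j ≤ len) :
    (len + 1 - j) * (len + 2) + (len + 1 - (j + 1)) <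
      (len + 1 - i) * (len + 2) + (len + 1 - j) := by
  calc (len + 1 - j) * (len + 2) + (len + 1 - (j + 1))
      < (len + 1 - j) * (len + 2) + (len + 2) := by omega
    _ = (len + 1 - j + 1) * (len + 2) := by ring
    _ ≤ (len + 1 - i) * (len + 2) := Nat.mul_le_mul_right _ (by omega)
    _ ≤ (len + 1 - i) * (len + 2) + (len + 1 - j) := Nat.le_add_right _ _

theorem pvMeasA2 (len i j : Nat) (hi : i < len) :
    (len + 1 - (i + 1)) * (len + 2) + (len + 1 - (i + 1 + 1)) <
      (len + 1 - i) * (len + 2) + (len + 1 - j) := by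
  calc (len + 1 - (i + 1)) * (len + 2) + (len + 1 - (i + 1 + 1))
      < (len + 1 - (i + 1)) * (len + 2) + (len + 2) := by omega
    _ = (len + 1 - (i + 1) + 1) * (len + 2) := by ring
    _ ≤ (len + 1 - i) * (len + 2) := Nat.mul_le_mul_right _ (by omega)
    _ ≤ (len + 1 - i) * (len + 2) + (len + 1 - j) := Nat.le_add_right _ _

theorem pvMeasA3 (len i j : Nat) (hj : j ≤ len) :
    (len + 1 - i) * (len + 2) + (len + 1 - (j + 1)) <
      (len + 1 - i) * (len + 2) + (len + 1 - j) := by omega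

theorem pvMeasSub (len j : Nat) (hj : j < len) : len - (j + 1) < len - j := by omega

theorem pvMeasB (len i j : Nat) (hij : i < j) (hi : i < len) : len - j < len - i := by omega

def popAgo (xs : List Int) (i j : Nat) : List Int :=
  if h : i < xs.length ∧ j ≤ xs.length then
    if hs : (PySem.List.slice xs (some (i : Int)) (some (j : Int))).sum = 10 then
      -- i += (j-i); j = i+1  (i becomes j: here j > i, since the empty slice sums to 0 ≠ 10)
      popAgo (pvZero xs i j) j (j + 1)
    else if hg : (PySem.List.slice xs (some (i : Int)) (some (j : Int))).sum > 10 then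
      popAgo xs (i + 1) (i + 1 + 1)
    else
      popAgo xs i (j + 1)
  else xs
termination_by (xs.length + 1 - i) * (xs.length + 2) + (xs.length + 1 - j)
decreasing_by
  · rw [pvZero_length]
    exact pvMeasA1 xs.length i j (pvLt_of_sum10 xs i j hs) h.2
  · exact pvMeasA2 xs.length i j h.1
  · exact pvMeasA3 xs.length i j h.2

def pop_line (line : List Int) : List Int := popAgo line 0 1

-- ===== PORT B =====
-- inner while loop of Source B: running sum from index j; first position after which it reaches ≥ 10
def popScan (xs : List Int) (j : Nat) (s : Int) : Option (Nat × Int) :=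
  if h : j < xs.length then
    if 10 ≤ s + xs[j] then some (j + 1, s + xs[j])
    else popScan xs (j + 1) (s + xs[j])
  else none
termination_by xs.length - j
decreasing_by exact pvMeasSub xs.length j h

theorem popScan_lt {xs : List Int} {j : Nat} {s : Int} {k : Nat} {s' : Int}
    (h : popScan xs j s = some (k, s')) : j < k ∧ k ≤ xs.length := by
  fun_induction popScan xs j s with
  | case1 j s hj hge => simp at h; omega
  | case2 j s hj hlt ih => obtain ⟨a, b⟩ := ih h; exact ⟨by omega, b⟩
  | case3 j s hj => simp at h

def popBgo (xs : List Int) (i : Nat) (res : List Int) : List Int :=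
  if h : i < xs.length then
    match hsc : popScan xs i 0 with
    | none => res ++ xs.drop i          -- res.extend(xs[i:]); i = n (loop ends)
    | some (j, s) =>
      if s = 10 then popBgo xs j (res ++ List.replicate (j - i) 0)
      else popBgo xs (i + 1) (res ++ [xs[i]])
  else res
termination_by xs.length - i
decreasing_by
  · exact pvMeasB xs.length i j (popScan_lt hsc).1 h
  · exact pvMeasSub xs.length i h

def pop_line_alt (line : List Int) : List Int := popBgo line 0 []

-- ===== PRECONDITION & SPEC =====
def Spec_pop_line (line : List Int) (out : List Int) : Prop := out = pop_line_alt line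
instance (line : List Int) (out : List Int) : Decidable (Spec_pop_line line out) := by unfold Spec_pop_line; infer_instance

-- ===== CLAIM (what is proved, stated in full; the proofs are below) =====
def Claim_equal_pop_line : Prop := ∀ (line : List Int), Dom_pop_line line → Spec_pop_line line (pop_line line)

-- ===== LEMMAS AND PROOFS =====

theorem pvZero_drop (xs : List Int) (i j : Nat) :
    (pvZero xs i j).drop j = xs.drop j := by
  apply List.ext_getElem
  · simp [pvZero]
  · intro n h1 h2
    simp only [pvZero, List.getElem_drop, List.getElem_mapIdx]
    rw [if_neg (by omega)]

theorem pvZero_take (xs : List Int) (i j : Nat) (hij : i ≤ j) (hj : j ≤ xs.length) :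
    (pvZero xs i j).take j = xs.take i ++ List.replicate (j - i) 0 := by
  apply List.ext_getElem
  · simp [pvZero]; omega
  · intro n h1 h2
    simp only [pvZero, List.getElem_take, List.getElem_mapIdx]
    have hn : n < j := by simp [pvZero] at h1; omega
    by_cases hni : n < i
    · rw [if_neg (by omega), List.getElem_append_left (by simp; omega)]
      simp [List.getElem_take]
    · rw [if_pos (by omega), List.getElem_append_right (by simp; omega)]
      simp

theorem getElem_eq_of_drop_eq {l₁ l₂ : List Int} {j : Nat} (hdrop : l₁.drop j = l₂.drop j)
    (h1 : j < l₁.length) (h2 : j < l₂.length) : l₁[j] = l₂[j] := by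
  have e1 : l₁[j] = (l₁.drop j)[0]'(by simp; omega) := by simp
  have e2 : l₂[j] = (l₂.drop j)[0]'(by simp; omega) := by simp
  rw [e1, e2]
  congr 1

theorem drop_succ_eq_of_drop_eq {l₁ l₂ : List Int} {j : Nat} (hdrop : l₁.drop j = l₂.drop j) :
    l₁.drop (j + 1) = l₂.drop (j + 1) := by
  have : ∀ l : List Int, l.drop (j + 1) = (l.drop j).drop 1 := by
    intro l; rw [List.drop_drop]
  rw [this l₁, this l₂, hdrop]

theorem popScan_ext (l₁ l₂ : List Int) (j : Nat) (s : Int)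
    (hlen : l₁.length = l₂.length) (hdrop : l₁.drop j = l₂.drop j) :
    popScan l₁ j s = popScan l₂ j s := by
  induction hn : l₁.length - j using Nat.strong_induction_on generalizing j s with
  | _ n ih =>
  subst hn
  rw [popScan, popScan]
  by_cases hj : j < l₁.length
  · have hj2 : j < l₂.length := by omega
    have hv : l₁[j] = l₂[j] := getElem_eq_of_drop_eq hdrop hj hj2
    rw [dif_pos hj, dif_pos hj2, ← hv]
    by_cases hge : 10 ≤ s + l₁[j]
    · rw [if_pos hge, if_pos hge]
    · rw [if_neg hge, if_neg hge]
      exact ih (l₁.length - (j + 1)) (by omega) (j + 1) _ (drop_succ_eq_of_drop_eq hdrop) rfl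
  · rw [dif_neg hj, dif_neg (by omega : ¬ j < l₂.length)]

theorem popBgo_eq_stop (xs : List Int) (i : Nat) (res : List Int) (h : ¬ i < xs.length) :
    popBgo xs i res = res := by
  rw [popBgo, dif_neg h]

theorem popBgo_eq_none (xs : List Int) (i : Nat) (res : List Int) (h : i < xs.length)
    (hsc : popScan xs i 0 = none) : popBgo xs i res = res ++ xs.drop i := by
  rw [popBgo, dif_pos h]
  split
  · rfl
  · next j' s' heq => rw [hsc] at heq; simp at heq

theorem popBgo_eq_some (xs : List Int) (i : Nat) (res : List Int) (j : Nat) (s : Int)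
    (h : i < xs.length) (hsc : popScan xs i 0 = some (j, s)) :
    popBgo xs i res =
      if s = 10 then popBgo xs j (res ++ List.replicate (j - i) 0)
      else popBgo xs (i + 1) (res ++ [xs[i]'h]) := by
  rw [popBgo, dif_pos h]
  split
  · next heq => rw [hsc] at heq; simp at heq
  · next j' s' heq =>
    rw [hsc] at heq
    obtain ⟨e1, e2⟩ : j' = j ∧ s' = s := by simpa using heq.symm
    subst e1; subst e2
    rfl

theorem popBgo_ext (l₁ l₂ : List Int) (i : Nat) (res : List Int)
    (hlen : l₁.length = l₂.length) (hdrop : l₁.drop i = l₂.drop i) :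
    popBgo l₁ i res = popBgo l₂ i res := by
  induction hn : l₁.length - i using Nat.strong_induction_on generalizing i res with
  | _ n ih =>
  subst hn
  by_cases h : i < l₁.length
  · have h2 : i < l₂.length := by omega
    have hscan : popScan l₁ i 0 = popScan l₂ i 0 := popScan_ext l₁ l₂ i 0 hlen hdrop
    cases hsc : popScan l₁ i 0 with
    | none =>
      rw [popBgo_eq_none l₁ i res h hsc, popBgo_eq_none l₂ i res h2 (hscan ▸ hsc), hdrop]
    | some p =>
      obtain ⟨j, s⟩ := p
      obtain ⟨hij, hjlen⟩ := popScan_lt hsc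
      have hdropj : l₁.drop j = l₂.drop j := by
        calc l₁.drop j = (l₁.drop i).drop (j - i) := by rw [List.drop_drop]; congr 1; omega
        _ = (l₂.drop i).drop (j - i) := by rw [hdrop]
        _ = l₂.drop j := by rw [List.drop_drop]; congr 1; omega
      rw [popBgo_eq_some l₁ i res j s h hsc, popBgo_eq_some l₂ i res j s h2 (hscan ▸ hsc)]
      by_cases hs10 : s = 10
      · rw [if_pos hs10, if_pos hs10]
        exact ih (l₁.length - j) (by omega) j (res ++ List.replicate (j - i) 0) hdropj rfl
      · rw [if_neg hs10, if_neg hs10]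
        rw [getElem_eq_of_drop_eq hdrop h h2]
        exact ih (l₁.length - (i + 1)) (by omega) (i + 1) (res ++ [l₂[i]'h2])
          (drop_succ_eq_of_drop_eq hdrop) rfl
  · rw [popBgo_eq_stop l₁ i res h, popBgo_eq_stop l₂ i res (by omega)]

theorem popBgo_acc (xs : List Int) (i : Nat) (res : List Int) :
    popBgo xs i res = res ++ popBgo xs i [] := by
  induction hn : xs.length - i using Nat.strong_induction_on generalizing i res with
  | _ n ih =>
  subst hn
  by_cases h : i < xs.length
  · cases hsc : popScan xs i 0 with
    | none => rw [popBgo_eq_none xs i res h hsc, popBgo_eq_none xs i [] h hsc]; simp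
    | some p =>
      obtain ⟨j, s⟩ := p
      obtain ⟨hij, hjlen⟩ := popScan_lt hsc
      rw [popBgo_eq_some xs i res j s h hsc, popBgo_eq_some xs i [] j s h hsc]
      by_cases hs10 : s = 10
      · rw [if_pos hs10, if_pos hs10]
        rw [ih (xs.length - j) (by omega) j (res ++ List.replicate (j - i) 0) rfl,
            ih (xs.length - j) (by omega) j ([] ++ List.replicate (j - i) 0) rfl]
        simp
      · rw [if_neg hs10, if_neg hs10]
        rw [ih (xs.length - (i+1)) (by omega) (i+1) (res ++ [xs[i]'h]) rfl,
            ih (xs.length - (i+1)) (by omega) (i+1) ([] ++ [xs[i]'h]) rfl]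
        simp
  · rw [popBgo_eq_stop xs i res h, popBgo_eq_stop xs i [] h]; simp

-- A's expansion phase from window (i, j) is B's inner scan started at j-1.
theorem sliceSum_succ (xs : List Int) (i j : Nat) (hij : i < j) (hj : j ≤ xs.length) :
    ((xs.drop i).take (j - i)).sum
      = ((xs.drop i).take (j - 1 - i)).sum + xs[j - 1]'(by omega) := by
  have h1 : j - i = (j - 1 - i) + 1 := by omega
  rw [h1, List.take_add_one]
  have h2 : (xs.drop i)[j - 1 - i]? = some (xs[j - 1]'(by omega)) := by
    rw [List.getElem?_drop]
    rw [List.getElem?_eq_getElem (by omega)]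
    congr 1
    congr 1
    omega
  rw [h2]
  simp

theorem popAgo_expand (xs : List Int) (i j : Nat) (hi : i < xs.length) (hij : i < j) :
    popAgo xs i j =
      match popScan xs (j - 1) (((xs.drop i).take (j - 1 - i)).sum) with
      | none => xs
      | some (k, s) =>
        if s = 10 then popAgo (pvZero xs i k) k (k + 1)
        else popAgo xs (i + 1) (i + 1 + 1) := by
  induction hn : xs.length + 1 - j using Nat.strong_induction_on generalizing j with
  | _ n ih =>
  subst hn
  by_cases hjlen : j ≤ xs.length
  · have hj1 : j - 1 < xs.length := by omega
    rw [popScan, dif_pos hj1]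
    have hsum : ((xs.drop i).take (j - 1 - i)).sum + xs[j - 1]'hj1
        = ((xs.drop i).take (j - i)).sum := (sliceSum_succ xs i j hij hjlen).symm
    rw [popAgo, dif_pos ⟨hi, hjlen⟩]
    rw [PySem.List.slice_natCast]
    by_cases hge : 10 ≤ ((xs.drop i).take (j - 1 - i)).sum + xs[j - 1]'hj1
    · rw [if_pos hge]
      have hj0 : j - 1 + 1 = j := by omega
      by_cases hs10 : ((xs.drop i).take (j - i)).sum = 10
      · rw [dif_pos hs10]
        simp only [hj0, hsum]
        rw [if_pos hs10]
      · rw [dif_neg hs10, dif_pos (by omega)]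
        simp only [hj0, hsum]
        rw [if_neg hs10]
    · rw [if_neg hge]
      have hlt : ¬ ((xs.drop i).take (j - i)).sum = 10 := by omega
      have hgt : ¬ ((xs.drop i).take (j - i)).sum > 10 := by omega
      rw [dif_neg hlt, dif_neg hgt]
      have := ih (xs.length + 1 - (j + 1)) (by omega) (j + 1) (by omega) rfl
      rw [this]
      simp only [Nat.add_sub_cancel]
      rw [hsum, show j - 1 + 1 = j from by omega]
  · rw [popAgo, dif_neg (by omega)]
    rw [popScan, dif_neg (by omega)]

theorem popAgo_main (xs : List Int) (i : Nat) (hi : i ≤ xs.length) :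
    popAgo xs i (i + 1) = xs.take i ++ popBgo xs i [] := by
  induction hn : xs.length - i using Nat.strong_induction_on generalizing xs i with
  | _ n ih =>
  subst hn
  by_cases hilt : i < xs.length
  · rw [popAgo_expand xs i (i + 1) hilt (by omega)]
    simp only [Nat.add_sub_cancel, Nat.sub_self, List.take_zero, List.sum_nil]
    cases hsc : popScan xs i 0 with
    | none =>
      rw [popBgo_eq_none xs i [] hilt hsc]
      show xs = xs.take i ++ ([] ++ xs.drop i)
      simp
    | some p =>
      obtain ⟨j, s⟩ := p
      obtain ⟨hij, hjlen⟩ := popScan_lt hsc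
      rw [popBgo_eq_some xs i [] j s hilt hsc]
      show (if s = 10 then popAgo (pvZero xs i j) j (j + 1) else popAgo xs (i + 1) (i + 1 + 1))
        = xs.take i ++ _
      by_cases hs10 : s = 10
      · rw [if_pos hs10, if_pos hs10]
        have hlen0 : (pvZero xs i j).length = xs.length := pvZero_length xs i j
        rw [ih (xs.length - j) (by omega) (pvZero xs i j) j (by omega) (by omega)]
        rw [pvZero_take xs i j (by omega) hjlen]
        rw [popBgo_ext (pvZero xs i j) xs j [] hlen0 (pvZero_drop xs i j)]
        rw [popBgo_acc xs j ([] ++ List.replicate (j - i) 0)]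
        simp
      · rw [if_neg hs10, if_neg hs10]
        rw [ih (xs.length - (i + 1)) (by omega) xs (i + 1) (by omega) rfl]
        rw [popBgo_acc xs (i + 1) ([] ++ [xs[i]'hilt])]
        have htake : xs.take (i + 1) = xs.take i ++ [xs[i]'hilt] := by
          rw [List.take_add_one, List.getElem?_eq_getElem hilt]
          simp
        rw [htake, List.append_assoc]
        rfl
  · have hieq : i = xs.length := by omega
    rw [popAgo, dif_neg (by omega), popBgo_eq_stop xs i [] hilt]
    simp [hieq]

-- ===== VERDICT (by name: the statement is the Claim_ definition above) =====
theorem pop_line_spec : Claim_equal_pop_line := by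
  intro line _
  unfold Spec_pop_line pop_line pop_line_alt
  simpa using popAgo_main line 0 (by omega)
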